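-- pv_equiv track=rewrite | github.com/bfaure/MNIST_Convolution2D | interface.py | get_hit_proximity
-- ===== SOURCE A (Python) =====
-- SEARCH_DISTANCE = 6
--
-- def get_hit_proximity(x, y, x_vals, y_vals):
--
-- 	x_search_range = []
-- 	y_search_range = []
--
-- 	for i in range(SEARCH_DISTANCE*2):
-- 		x_search_range.append(SEARCH_DISTANCE+x-i)
-- 		y_search_range.append(SEARCH_DISTANCE+y-i)
--
-- 	x_index = -SEARCH_DISTANCE
-- 	best = 1000
-- 	for x_targ in x_search_range:
-- 		y_index = -SEARCH_DISTANCE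
-- 		for y_targ in y_search_range:
-- 			for x_val,y_val in list(zip(x_vals, y_vals)):
-- 				if x_val==x_targ and y_val==y_targ:
-- 					proximity = abs(x_index*y_index)
-- 					if proximity < best:
-- 						best = proximity
-- 			y_index += 1
-- 		x_index += 1
--
-- 	return best
-- ===== SOURCE B (Python) =====
-- SEARCH_DISTANCE = 6
--
-- def get_hit_proximity(x, y, x_vals, y_vals):
--     # One point-driven pass: the grid cell a point can match is its own
--     # coordinates, so just test each point against the search window.
--     x_targets = set(range(x - SEARCH_DISTANCE + 1, x + SEARCH_DISTANCE + 1))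
--     y_targets = set(range(y - SEARCH_DISTANCE + 1, y + SEARCH_DISTANCE + 1))
--     best = 1000
--     for x_val, y_val in zip(x_vals, y_vals):
--         if x_val in x_targets and y_val in y_targets:
--             best = min(best, abs((x - x_val) * (y - y_val)))
--     return best
-- ===== Notes on version B (the rewrite author's own statement) =====
-- stated objective: faster
-- what changed: Replaced A's 12x12 grid-cell double loop (with an innermost scan over all points per cell) by a single point-driven pass: each point is tested against precomputed x/y window sets and contributes |(x-x_val)*(y-y_val)| directly, eliminating the grid loops.
import Mathlib
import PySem

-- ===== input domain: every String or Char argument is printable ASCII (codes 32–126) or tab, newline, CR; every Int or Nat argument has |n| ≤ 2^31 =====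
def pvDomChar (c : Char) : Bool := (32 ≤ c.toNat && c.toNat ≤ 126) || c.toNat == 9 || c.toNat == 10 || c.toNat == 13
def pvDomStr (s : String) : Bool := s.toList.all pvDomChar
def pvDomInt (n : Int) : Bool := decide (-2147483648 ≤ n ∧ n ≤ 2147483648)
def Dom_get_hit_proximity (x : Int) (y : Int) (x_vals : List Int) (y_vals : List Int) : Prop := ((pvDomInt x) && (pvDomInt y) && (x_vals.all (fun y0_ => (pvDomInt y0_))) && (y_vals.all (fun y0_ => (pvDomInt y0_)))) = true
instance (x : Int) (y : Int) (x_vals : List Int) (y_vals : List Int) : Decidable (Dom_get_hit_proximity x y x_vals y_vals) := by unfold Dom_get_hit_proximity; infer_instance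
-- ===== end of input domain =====

-- B replaces A's 12x12 grid-cell double loop by a single point-driven pass over
-- zip(x_vals, y_vals) against precomputed window sets (objective: faster, constant factor).

-- ===== PORT A =====
def get_hit_proximity (x : Int) (y : Int) (x_vals : List Int) (y_vals : List Int) : Int :=
  let ranges := (PySem.List.pyRange 0 (6 * 2) 1).foldl
    (fun (acc : List Int × List Int) i => (acc.1 ++ [6 + x - i], acc.2 ++ [6 + y - i]))
    (([] : List Int), ([] : List Int))
  let x_search_range := ranges.1
  let y_search_range := ranges.2
  let pts := x_vals.zip y_vals
  let res := x_search_range.foldl (fun (st : Int × Int) x_targ =>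
      let st2 := y_search_range.foldl (fun (st2 : Int × Int) y_targ =>
          let best' := pts.foldl (fun best p =>
              if p.1 = x_targ ∧ p.2 = y_targ then
                (if |st.1 * st2.1| < best then |st.1 * st2.1| else best)
              else best) st2.2
          (st2.1 + 1, best')) ((-6 : Int), st.2)
      (st.1 + 1, st2.2)) ((-6 : Int), (1000 : Int))
  res.2

-- ===== PORT B =====
def get_hit_proximity_alt (x : Int) (y : Int) (x_vals : List Int) (y_vals : List Int) : Int :=
  let x_targets : PySem.Set Int := PySem.Set.ofList (PySem.List.pyRange (x - 6 + 1) (x + 6 + 1) 1)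
  let y_targets : PySem.Set Int := PySem.Set.ofList (PySem.List.pyRange (y - 6 + 1) (y + 6 + 1) 1)
  (x_vals.zip y_vals).foldl (fun best p =>
    if PySem.Set.contains x_targets p.1 && PySem.Set.contains y_targets p.2 then
      min best |(x - p.1) * (y - p.2)|
    else best) 1000

-- ===== PRECONDITION & SPEC =====
def Spec_get_hit_proximity (x : Int) (y : Int) (x_vals : List Int) (y_vals : List Int) (out : Int) : Prop := out = get_hit_proximity_alt x y x_vals y_vals
instance (x : Int) (y : Int) (x_vals : List Int) (y_vals : List Int) (out : Int) : Decidable (Spec_get_hit_proximity x y x_vals y_vals out) := by unfold Spec_get_hit_proximity; infer_instance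

-- ===== CLAIM (what is proved, stated in full; the proofs are below) =====
def Claim_equal_get_hit_proximity : Prop := ∀ (x : Int) (y : Int) (x_vals : List Int) (y_vals : List Int), Dom_get_hit_proximity x y x_vals y_vals → Spec_get_hit_proximity x y x_vals y_vals (get_hit_proximity x y x_vals y_vals)

-- ===== LEMMAS AND PROOFS =====

-- A's search ranges, generated abstractly: gridList c j n = [6+c-j, 6+c-(j+1), …] (n elements).
def gridList (c : Int) : Nat → Nat → List Int
  | _, 0 => []
  | j, n + 1 => (6 + c - (j : Int)) :: gridList c (j + 1) n

lemma mem_gridList (c t : Int) : ∀ (n j : Nat), t ∈ gridList c j n ↔ (6 + c - j - n < t ∧ t ≤ 6 + c - j) := by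
  intro n
  induction n with
  | zero => intro j; simp [gridList]
  | succ n ih =>
    intro j
    simp [gridList, ih (j + 1)]
    omega

-- the innermost scan over the points, for a fixed cell, is a conditional min with a constant value
lemma if_lt_eq_min (v b : Int) : (if v < b then v else b) = min b v := by
  rw [min_def]; split_ifs <;> omega

lemma inner_fold (pts : List (Int × Int)) (xt yt v : Int) : ∀ b : Int,
    pts.foldl (fun best p => if p.1 = xt ∧ p.2 = yt then (if v < best then v else best) else best) b
      = if pts.any (fun p => p.1 == xt && p.2 == yt) then min b v else b := by
  induction pts with
  | nil => intro b; simp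
  | cons p pts ih =>
    intro b
    rw [List.foldl_cons]
    by_cases h : p.1 = xt ∧ p.2 = yt
    · rw [if_pos h, if_lt_eq_min, ih]
      have hb : (p.1 == xt && p.2 == yt) = true := by simp [h.1, h.2]
      simp only [List.any_cons, hb, Bool.true_or, if_pos]
      split_ifs <;> simp
    · rw [if_neg h, ih]
      have hb : (p.1 == xt && p.2 == yt) = false := by
        simp only [Bool.and_eq_false_iff, beq_eq_false_iff_ne, ne_eq]; tauto
      simp [hb]

-- middle loop: strip the running y_index (it always equals y - y_targ on A's range)
lemma mid_fold (y xi xt : Int) (pts : List (Int × Int)) : ∀ (n j : Nat) (b : Int),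
    ((gridList y j n).foldl (fun (st2 : Int × Int) y_targ =>
        (st2.1 + 1, pts.foldl (fun best p =>
            if p.1 = xt ∧ p.2 = y_targ then
              (if |xi * st2.1| < best then |xi * st2.1| else best)
            else best) st2.2))
      (((j : Int) - 6), b))
    = ((j : Int) + n - 6,
       (gridList y j n).foldl (fun best y_targ =>
          if pts.any (fun p => p.1 == xt && p.2 == y_targ) then min best |xi * (y - y_targ)| else best) b) := by
  intro n
  induction n with
  | zero => intro j b; simp [gridList]
  | succ n ih =>
    intro j b
    rw [show gridList y j (n + 1) = (6 + y - (j : Int)) :: gridList y (j + 1) n from rfl]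
    simp only [List.foldl_cons]
    rw [inner_fold]
    have h2 : xi * ((j : Int) - 6) = xi * (y - (6 + y - (j : Int))) := by ring
    have h1 : ((j : Int) - 6) + 1 = ((j + 1 : Nat) : Int) - 6 := by push_cast; ring
    rw [h2, h1, ih (j + 1)]
    simp only [Prod.mk.injEq]
    refine ⟨by push_cast; ring, trivial⟩

-- outer loop: strip the running x_index likewise
lemma out_fold (x y : Int) (pts : List (Int × Int)) : ∀ (n j : Nat) (b : Int),
    ((gridList x j n).foldl (fun (st : Int × Int) x_targ =>
        (st.1 + 1,
         ((gridList y 0 12).foldl (fun (st2 : Int × Int) y_targ =>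
            (st2.1 + 1, pts.foldl (fun best p =>
                if p.1 = x_targ ∧ p.2 = y_targ then
                  (if |st.1 * st2.1| < best then |st.1 * st2.1| else best)
                else best) st2.2))
          ((-6 : Int), st.2)).2))
      (((j : Int) - 6), b))
    = ((j : Int) + n - 6,
       (gridList x j n).foldl (fun best x_targ =>
          (gridList y 0 12).foldl (fun best y_targ =>
            if pts.any (fun p => p.1 == x_targ && p.2 == y_targ) then
              min best |(x - x_targ) * (y - y_targ)| else best) best) b) := by
  intro n
  induction n with
  | zero => intro j b; simp [gridList]
  | succ n ih =>
    intro j b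
    rw [show gridList x j (n + 1) = (6 + x - (j : Int)) :: gridList x (j + 1) n from rfl]
    simp only [List.foldl_cons]
    rw [show ((-6 : Int), b) = (((0 : Nat) : Int) - 6, b) from by norm_num,
       mid_fold y ((j : Int) - 6) (6 + x - (j : Int)) pts 12 0 b]
    have h2 : ∀ y_targ : Int, ((j : Int) - 6) * (y - y_targ) = (x - (6 + x - (j : Int))) * (y - y_targ) := by
      intro y_targ; ring
    simp only [h2]
    have h1 : ((j : Int) - 6) + 1 = ((j + 1 : Nat) : Int) - 6 := by push_cast; ring
    rw [h1, ih (j + 1)]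
    simp only [Prod.mk.injEq]
    refine ⟨by push_cast; ring, trivial⟩

-- conditional-min folds are min-folds over the filtered, mapped candidate list
lemma fold_if_to_min {α : Type} (c : α → Bool) (v : α → Int) (l : List α) : ∀ b : Int,
    l.foldl (fun best a => if c a then min best (v a) else best) b
      = ((l.filter c).map v).foldl min b := by
  induction l with
  | nil => intro b; simp
  | cons a l ih =>
    intro b
    by_cases h : c a = true <;> simp [List.foldl, h, ih]

lemma fold_fold_min {α : Type} (g : α → List Int) (l : List α) : ∀ b : Int,
    l.foldl (fun b a => (g a).foldl min b) b = (l.flatMap g).foldl min b := by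
  induction l with
  | nil => intro b; simp
  | cons a l ih => intro b; simp [List.foldl, ih, List.foldl_append]

-- a min-fold only depends on the SET of candidates
lemma foldl_min_mem (l : List Int) : ∀ b : Int, l.foldl min b ∈ b :: l := by
  induction l with
  | nil => intro b; simp
  | cons a l ih =>
    intro b
    simp only [List.foldl_cons]
    rcases List.mem_cons.1 (ih (min b a)) with h | h
    · rcases min_choice b a with hm | hm <;> rw [h, hm] <;> simp
    · simp [h]

lemma foldl_min_le (l : List Int) : ∀ b : Int, ∀ a ∈ b :: l, l.foldl min b ≤ a := by
  induction l with
  | nil => intro b a ha; simp at ha; simp [ha]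
  | cons c l ih =>
    intro b a ha
    simp only [List.foldl_cons]
    have hmin : List.foldl min (min b c) l ≤ min b c := ih (min b c) (min b c) (by simp)
    rcases List.mem_cons.1 ha with h | h
    · rw [h]; exact hmin.trans (min_le_left _ _)
    · rcases List.mem_cons.1 h with h' | h'
      · rw [h']; exact hmin.trans (min_le_right _ _)
      · exact ih (min b c) a (List.mem_cons_of_mem _ h')

lemma foldl_min_congr (l1 l2 : List Int) (b : Int) (h : ∀ v, v ∈ l1 ↔ v ∈ l2) :
    l1.foldl min b = l2.foldl min b := by
  apply le_antisymm
  · apply foldl_min_le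
    rcases List.mem_cons.1 (foldl_min_mem l2 b) with h' | h'
    · simp [h']
    · exact List.mem_cons_of_mem _ ((h _).2 h')
  · apply foldl_min_le
    rcases List.mem_cons.1 (foldl_min_mem l1 b) with h' | h'
    · simp [h']
    · exact List.mem_cons_of_mem _ ((h _).1 h')

-- candidate sets of the two programs coincide
lemma cand_mem_iff (x y : Int) (pts : List (Int × Int)) (v : Int) :
    (v ∈ (gridList x 0 12).flatMap (fun x_targ =>
        (((gridList y 0 12).filter (fun y_targ => pts.any (fun p => p.1 == x_targ && p.2 == y_targ))).map
          (fun y_targ => |(x - x_targ) * (y - y_targ)|)))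
    ↔ v ∈ ((pts.filter (fun p =>
        PySem.Set.contains (PySem.Set.ofList (PySem.List.pyRange (x - 6 + 1) (x + 6 + 1) 1)) p.1 &&
        PySem.Set.contains (PySem.Set.ofList (PySem.List.pyRange (y - 6 + 1) (y + 6 + 1) 1)) p.2)).map
          (fun p => |(x - p.1) * (y - p.2)|))) := by
  simp only [List.mem_flatMap, List.mem_map, List.mem_filter, List.any_eq_true,
    PySem.Set.contains_iff, PySem.Set.mem_ofList, PySem.List.mem_pyRange_one,
    Bool.and_eq_true, beq_iff_eq, mem_gridList]
  constructor
  · rintro ⟨xt, hxt, yt, ⟨hyt, p, hp, hp1, hp2⟩, hv⟩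
    refine ⟨p, ⟨hp, ⟨?_, ?_⟩, ⟨?_, ?_⟩⟩, ?_⟩
    · push_cast at hxt; omega
    · push_cast at hxt; omega
    · push_cast at hyt; omega
    · push_cast at hyt; omega
    · rw [hp1, hp2]; exact hv
  · rintro ⟨p, ⟨hp, ⟨hx1, hx2⟩, ⟨hy1, hy2⟩⟩, hv⟩
    refine ⟨p.1, by push_cast; omega, p.2, ⟨by push_cast; omega, p, hp, rfl, rfl⟩, hv⟩

-- A's literal range-building fold produces exactly gridList _ 0 12
lemma ranges_eq (x y : Int) :
    (PySem.List.pyRange 0 (6 * 2) 1).foldl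
      (fun (acc : List Int × List Int) i => (acc.1 ++ [6 + x - i], acc.2 ++ [6 + y - i]))
      (([] : List Int), ([] : List Int))
    = (gridList x 0 12, gridList y 0 12) := by
  have hR : PySem.List.pyRange 0 (6 * 2) 1 = [0, 1, 2, 3, 4, 5, 6, 7, 8, 9, 10, 11] := by decide
  rw [hR]
  simp [List.foldl, gridList]

-- ===== VERDICT (by name: the statement is the Claim_ definition above) =====
theorem get_hit_proximity_spec : Claim_equal_get_hit_proximity := by
  intro x y x_vals y_vals _
  unfold Spec_get_hit_proximity get_hit_proximity get_hit_proximity_alt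
  simp only [ranges_eq]
  have h0 : ((-6 : Int), (1000 : Int)) = (((0 : Nat) : Int) - 6, (1000 : Int)) := by norm_num
  rw [h0, out_fold x y (x_vals.zip y_vals) 12 0 1000]
  simp only [fold_if_to_min, fold_fold_min]
  exact foldl_min_congr _ _ 1000 (cand_mem_iff x y (x_vals.zip y_vals))
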